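-- pv_equiv track=rewrite | github.com/Veroski/new-tfg-main | backend/app/utils/model_helper_updated.py | _infer_modality
-- ===== SOURCE A (Python) =====
-- from typing import Any, Dict, List
--
-- TEXT_TASKS = {
--     "text-generation",
--     "text-classification",
--     "summarization",
--     "translation",
--     "question-answering",
--     "conversational",
--     "fill-mask",
-- }
--
-- VISION_TASKS = {
--     "image-classification",
--     "object-detection",
--     "image-segmentation",
--     "image-to-text",
-- }
--
-- AUDIO_TASKS = {
--     "automatic-speech-recognition",
--     "audio-classification",
-- }
--
-- def _infer_modality(task: str, tags: List[str]) -> str: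
--     if task in TEXT_TASKS or any(t in TEXT_TASKS for t in tags):
--         return "text"
--     if task in VISION_TASKS or any(t in VISION_TASKS for t in tags):
--         return "vision"
--     if task in AUDIO_TASKS or any(t in AUDIO_TASKS for t in tags):
--         return "audio"
--     # fallback
--     return "multimodal"
-- ===== SOURCE B (Python) =====
-- # B: one reverse-lookup dict + single collecting pass, then explicit priority resolution.
-- _MODALITY = {
--     "text-generation": "text",
--     "text-classification": "text",
--     "summarization": "text",
--     "translation": "text",
--     "question-answering": "text",
--     "conversational": "text",
--     "fill-mask": "text",
--     "image-classification": "vision",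
--     "object-detection": "vision",
--     "image-segmentation": "vision",
--     "image-to-text": "vision",
--     "automatic-speech-recognition": "audio",
--     "audio-classification": "audio",
-- }
--
-- def _infer_modality(task, tags):
--     found = set()
--     for s in [task, *tags]:
--         m = _MODALITY.get(s)
--         if m is not None:
--             found.add(m)
--     for m in ("text", "vision", "audio"):
--         if m in found:
--             return m
--     return "multimodal"
-- ===== Notes on version B (the rewrite author's own statement) =====
-- stated objective: alternative
-- what changed: Replaces three ordered membership scans over three separate sets by one reverse-lookup dict, a single collecting pass over task plus tags, and an explicit priority resolution over ('text','vision','audio'); one dict lookup per string instead of up to three set tests.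
import Mathlib
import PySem

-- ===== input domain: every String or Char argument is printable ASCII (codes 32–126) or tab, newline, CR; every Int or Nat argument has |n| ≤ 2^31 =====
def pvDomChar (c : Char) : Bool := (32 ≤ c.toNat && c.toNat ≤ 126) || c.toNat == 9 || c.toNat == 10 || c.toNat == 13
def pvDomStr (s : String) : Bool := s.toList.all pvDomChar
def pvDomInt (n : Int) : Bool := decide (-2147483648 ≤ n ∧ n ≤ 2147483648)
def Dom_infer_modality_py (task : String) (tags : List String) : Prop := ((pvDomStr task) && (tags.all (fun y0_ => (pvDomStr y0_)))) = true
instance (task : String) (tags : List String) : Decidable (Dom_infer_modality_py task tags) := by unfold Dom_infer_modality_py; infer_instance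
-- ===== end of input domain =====

-- B replaces A's three ordered set-membership scans by one reverse-lookup dict, a single
-- collecting pass, and an explicit priority resolution (objective: alternative).

-- ===== PORT A =====
def TEXT_TASKS : PySem.Set String := PySem.Set.ofList
  ["text-generation", "text-classification", "summarization", "translation",
   "question-answering", "conversational", "fill-mask"]

def VISION_TASKS : PySem.Set String := PySem.Set.ofList
  ["image-classification", "object-detection", "image-segmentation", "image-to-text"]

def AUDIO_TASKS : PySem.Set String := PySem.Set.ofList
  ["automatic-speech-recognition", "audio-classification"]

def infer_modality_py (task : String) (tags : List String) : String :=
  if PySem.Set.contains TEXT_TASKS task || tags.any (fun t => PySem.Set.contains TEXT_TASKS t) then "text"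
  else if PySem.Set.contains VISION_TASKS task || tags.any (fun t => PySem.Set.contains VISION_TASKS t) then "vision"
  else if PySem.Set.contains AUDIO_TASKS task || tags.any (fun t => PySem.Set.contains AUDIO_TASKS t) then "audio"
  else "multimodal"

-- ===== PORT B =====
def MODALITY : PySem.Dict String String := PySem.Dict.ofList
  [("text-generation", "text"), ("text-classification", "text"), ("summarization", "text"),
   ("translation", "text"), ("question-answering", "text"), ("conversational", "text"),
   ("fill-mask", "text"),
   ("image-classification", "vision"), ("object-detection", "vision"),
   ("image-segmentation", "vision"), ("image-to-text", "vision"),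
   ("automatic-speech-recognition", "audio"), ("audio-classification", "audio")]

-- the collecting loop of Source B: for s in [task, *tags]: m = _MODALITY.get(s); if m is not None: found.add(m)
def collectModalities (xs : List String) : PySem.Set String :=
  xs.foldl
    (fun acc s =>
      match PySem.Dict.get? MODALITY s with
      | some m => PySem.Set.add acc m
      | none => acc)
    PySem.Set.empty

def infer_modality_py_alt (task : String) (tags : List String) : String :=
  let found := collectModalities (task :: tags)
  if PySem.Set.contains found "text" then "text"
  else if PySem.Set.contains found "vision" then "vision"
  else if PySem.Set.contains found "audio" then "audio"
  else "multimodal"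

-- ===== PRECONDITION & SPEC =====
def Spec_infer_modality_py (task : String) (tags : List String) (out : String) : Prop := out = infer_modality_py_alt task tags
instance (task : String) (tags : List String) (out : String) : Decidable (Spec_infer_modality_py task tags out) := by unfold Spec_infer_modality_py; infer_instance

-- ===== CLAIM (what is proved, stated in full; the proofs are below) =====
def Claim_equal_infer_modality_py : Prop := ∀ (task : String) (tags : List String), Dom_infer_modality_py task tags → Spec_infer_modality_py task tags (infer_modality_py task tags)

-- ===== LEMMAS AND PROOFS =====

-- membership in B's collected set: m appears iff some input string looks up to m
theorem mem_collect_aux (xs : List String) (acc : List String) (m : String) :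
    (m ∈ xs.foldl
      (fun acc s =>
        match PySem.Dict.get? MODALITY s with
        | some v => PySem.Set.add acc v
        | none => acc) acc) ↔
      m ∈ acc ∨ ∃ s ∈ xs, PySem.Dict.get? MODALITY s = some m := by
  induction xs generalizing acc with
  | nil => simp
  | cons x xs ih =>
    simp only [List.foldl_cons, List.mem_cons]
    cases h : PySem.Dict.get? MODALITY x with
    | none =>
      simp only [ih]
      constructor
      · rintro (h1 | ⟨s, hs, hl⟩)
        · exact Or.inl h1
        · exact Or.inr ⟨s, Or.inr hs, hl⟩
      · rintro (h1 | ⟨s, hs | hs, hl⟩)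
        · exact Or.inl h1
        · exact absurd hl (by rw [hs, h]; simp)
        · exact Or.inr ⟨s, hs, hl⟩
    | some v =>
      simp only [ih, PySem.Set.mem_add]
      constructor
      · rintro ((h1 | h1) | ⟨s, hs, hl⟩)
        · exact Or.inl h1
        · exact Or.inr ⟨x, Or.inl rfl, by rw [h, h1]⟩
        · exact Or.inr ⟨s, Or.inr hs, hl⟩
      · rintro (h1 | ⟨s, hs | hs, hl⟩)
        · exact Or.inl (Or.inl h1)
        · rw [hs, h] at hl
          exact Or.inl (Or.inr (Option.some.inj hl).symm)
        · exact Or.inr ⟨s, hs, hl⟩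

theorem mem_collect (xs : List String) (m : String) :
    m ∈ collectModalities xs ↔ ∃ s ∈ xs, PySem.Dict.get? MODALITY s = some m := by
  rw [collectModalities, mem_collect_aux]
  simp [PySem.Set.empty]

-- the reverse dict agrees pointwise with the three sets
theorem modality_get_eq (s : String) :
    PySem.Dict.get? MODALITY s =
      (if PySem.Set.contains TEXT_TASKS s then some "text"
       else if PySem.Set.contains VISION_TASKS s then some "vision"
       else if PySem.Set.contains AUDIO_TASKS s then some "audio"
       else none) := by
  by_cases h1 : s = "text-generation"; · subst h1; decide
  by_cases h2 : s = "text-classification"; · subst h2; decide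
  by_cases h3 : s = "summarization"; · subst h3; decide
  by_cases h4 : s = "translation"; · subst h4; decide
  by_cases h5 : s = "question-answering"; · subst h5; decide
  by_cases h6 : s = "conversational"; · subst h6; decide
  by_cases h7 : s = "fill-mask"; · subst h7; decide
  by_cases h8 : s = "image-classification"; · subst h8; decide
  by_cases h9 : s = "object-detection"; · subst h9; decide
  by_cases h10 : s = "image-segmentation"; · subst h10; decide
  by_cases h11 : s = "image-to-text"; · subst h11; decide
  by_cases h12 : s = "automatic-speech-recognition"; · subst h12; decide
  by_cases h13 : s = "audio-classification"; · subst h13; decide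
  have hmk : MODALITY = PySem.Dict.mk
    [("text-generation", "text"), ("text-classification", "text"), ("summarization", "text"),
     ("translation", "text"), ("question-answering", "text"), ("conversational", "text"),
     ("fill-mask", "text"),
     ("image-classification", "vision"), ("object-detection", "vision"),
     ("image-segmentation", "vision"), ("image-to-text", "vision"),
     ("automatic-speech-recognition", "audio"), ("audio-classification", "audio")] := by decide
  rw [hmk]
  simp only [PySem.Dict.get?_mk_cons, TEXT_TASKS, VISION_TASKS, AUDIO_TASKS,
    PySem.Set.contains, List.contains_iff_mem, PySem.Set.mem_ofList, List.mem_cons,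
    List.not_mem_nil]
  simp [PySem.Dict.get?, Ne.symm h1, Ne.symm h2, Ne.symm h3, Ne.symm h4, Ne.symm h5,
    Ne.symm h6, Ne.symm h7, Ne.symm h8, Ne.symm h9, Ne.symm h10, Ne.symm h11,
    Ne.symm h12, Ne.symm h13, h1, h2, h3, h4, h5, h6, h7, h8, h9, h10, h11, h12, h13]

theorem lookup_text (s : String) :
    PySem.Dict.get? MODALITY s = some "text" ↔ PySem.Set.contains TEXT_TASKS s = true := by
  rw [modality_get_eq]; split_ifs <;> simp_all

-- the three task sets are pairwise disjoint
theorem not_vision_of_text (s : String) (h : s ∈ TEXT_TASKS) : s ∉ VISION_TASKS := by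
  simp only [TEXT_TASKS, PySem.Set.mem_ofList, List.mem_cons, List.not_mem_nil, or_false] at h
  rcases h with rfl | rfl | rfl | rfl | rfl | rfl | rfl <;> decide

theorem not_audio_of_text (s : String) (h : s ∈ TEXT_TASKS) : s ∉ AUDIO_TASKS := by
  simp only [TEXT_TASKS, PySem.Set.mem_ofList, List.mem_cons, List.not_mem_nil, or_false] at h
  rcases h with rfl | rfl | rfl | rfl | rfl | rfl | rfl <;> decide

theorem not_audio_of_vision (s : String) (h : s ∈ VISION_TASKS) : s ∉ AUDIO_TASKS := by
  simp only [VISION_TASKS, PySem.Set.mem_ofList, List.mem_cons, List.not_mem_nil, or_false] at h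
  rcases h with rfl | rfl | rfl | rfl <;> decide

theorem lookup_vision (s : String) :
    PySem.Dict.get? MODALITY s = some "vision" ↔ PySem.Set.contains VISION_TASKS s = true := by
  rw [modality_get_eq]
  split_ifs with hT hV hA
  · have hnv : s ∉ VISION_TASKS := not_vision_of_text s (List.contains_iff_mem.mp hT)
    simp [PySem.Set.contains, hnv]
  · simpa using List.contains_iff_mem.mp hV
  · simp_all
  · simp_all

theorem lookup_audio (s : String) :
    PySem.Dict.get? MODALITY s = some "audio" ↔ PySem.Set.contains AUDIO_TASKS s = true := by
  rw [modality_get_eq]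
  split_ifs with hT hV hA
  · have hna : s ∉ AUDIO_TASKS := not_audio_of_text s (List.contains_iff_mem.mp hT)
    simp [PySem.Set.contains, hna]
  · have hna : s ∉ AUDIO_TASKS := not_audio_of_vision s (List.contains_iff_mem.mp hV)
    simp [PySem.Set.contains, hna]
  · simpa using List.contains_iff_mem.mp hA
  · simp_all

theorem found_label (task : String) (tags : List String) (m : String) (S : PySem.Set String)
    (hchar : ∀ s, PySem.Dict.get? MODALITY s = some m ↔ PySem.Set.contains S s = true) :
    PySem.Set.contains (collectModalities (task :: tags)) m
      = (PySem.Set.contains S task || tags.any (fun t => PySem.Set.contains S t)) := by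
  rw [Bool.eq_iff_iff]
  simp only [PySem.Set.contains, List.contains_iff_mem, List.any_eq_true, Bool.or_eq_true,
    mem_collect, List.mem_cons]
  constructor
  · rintro ⟨s, hs | hs, hl⟩
    · exact Or.inl (by rw [← hs, ← List.contains_iff_mem]; exact (hchar s).mp hl)
    · exact Or.inr ⟨s, hs, by rw [← List.contains_iff_mem]; exact (hchar s).mp hl⟩
  · rintro (h | ⟨t, ht, hc⟩)
    · exact ⟨task, Or.inl rfl, (hchar task).mpr (by rwa [PySem.Set.contains, List.contains_iff_mem])⟩
    · exact ⟨t, Or.inr ht, (hchar t).mpr (by rwa [PySem.Set.contains, List.contains_iff_mem])⟩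

-- ===== VERDICT (by name: the statement is the Claim_ definition above) =====
theorem infer_modality_py_spec : Claim_equal_infer_modality_py := by
  intro task tags _
  unfold Spec_infer_modality_py
  simp only [infer_modality_py, infer_modality_py_alt]
  rw [found_label task tags "text" TEXT_TASKS lookup_text,
      found_label task tags "vision" VISION_TASKS lookup_vision,
      found_label task tags "audio" AUDIO_TASKS lookup_audio]
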